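-- pv_equiv track=rewrite | github.com/kimjune01/june.kim | worklog/h11_heuristic_spanner_v2.py | is_fully_reachable
-- ===== SOURCE A (Python) =====
-- from collections import defaultdict
-- import heapq
--
-- def build_adj(k, edges):
--     adj = defaultdict(list)
--     for (a, b, t) in edges:
--         adj[a].append((b, t))
--         adj[b].append((a, t))
--     return adj
--
-- def temporal_reachable_from(source, adj):
--     best = {source: 0}
--     queue = [(0, source)]
--     heapq.heapify(queue)
--     while queue:
--         t_arr, u = heapq.heappop(queue)
--         if t_arr > best.get(u, float('inf')):
--             continue
--         for (v, t_edge) in adj[u]: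
--             if t_edge >= t_arr:
--                 if t_edge < best.get(v, float('inf')):
--                     best[v] = t_edge
--                     heapq.heappush(queue, (t_edge, v))
--     return set(best.keys())
--
-- def is_fully_reachable(k, edges):
--     adj = build_adj(k, edges)
--     n = 2 * k
--     for s in range(n):
--         r = temporal_reachable_from(s, adj)
--         if len(r) < n:
--             return False
--     return True
-- ===== SOURCE B (Python) =====
-- def is_fully_reachable(k, edges):
--     # Label-correcting fixpoint: repeatedly relax all edges (both directions)
--     # until the earliest-arrival map stops changing; no heap, no adjacency build.
--     n = 2 * k
--     for s in range(n):
--         best = {s: 0}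
--         changed = True
--         while changed:
--             changed = False
--             for a, b, t in edges:
--                 if a in best and best[a] <= t and (b not in best or t < best[b]):
--                     best[b] = t
--                     changed = True
--                 if b in best and best[b] <= t and (a not in best or t < best[a]):
--                     best[a] = t
--                     changed = True
--         if len(best) < n:
--             return False
--     return True
-- ===== Notes on version B (the rewrite author's own statement) =====
-- stated objective: simpler
-- what changed: A runs, per source, a temporal Dijkstra over a prebuilt adjacency map with a binary heap of (arrival, node) tuples; B drops the heap and the adjacency build entirely and instead relaxes every edge (in both directions) against an earliest-arrival dict in repeated passes until a fixpoint, then compares the dict size the same way.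
import Mathlib
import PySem

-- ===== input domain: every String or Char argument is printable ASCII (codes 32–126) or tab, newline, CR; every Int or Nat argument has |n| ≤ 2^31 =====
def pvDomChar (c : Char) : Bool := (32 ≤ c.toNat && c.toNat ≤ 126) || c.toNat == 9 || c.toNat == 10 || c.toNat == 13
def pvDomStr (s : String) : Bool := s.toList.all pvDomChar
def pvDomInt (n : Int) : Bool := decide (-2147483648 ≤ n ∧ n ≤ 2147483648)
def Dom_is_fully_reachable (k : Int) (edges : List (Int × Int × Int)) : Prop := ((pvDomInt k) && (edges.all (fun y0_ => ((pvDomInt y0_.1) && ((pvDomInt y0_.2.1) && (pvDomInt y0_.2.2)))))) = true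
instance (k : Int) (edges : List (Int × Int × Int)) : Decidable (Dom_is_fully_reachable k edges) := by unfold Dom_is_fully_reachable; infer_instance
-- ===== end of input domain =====

-- B replaces A's per-source heap-driven temporal Dijkstra by a plain label-correcting
-- fixpoint (relax every edge until nothing changes); objective: simpler, not faster.

-- ===== PORT A =====
-- A's Dijkstra loop: the heap is a list, a pop removes its lexicographic minimum
-- (heapq tuples are (time, node); equal tuples are identical, so this is exact).
def pvLexLt (p q : Int × Int) : Bool := p.1 < q.1 || (p.1 == q.1 && p.2 < q.2)

def pvPopMin (q : List (Int × Int)) : Option ((Int × Int) × List (Int × Int)) :=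
  match q with
  | [] => none
  | x :: xs =>
    let m := xs.foldl (fun m y => if pvLexLt y m then y else m) x
    some (m, (x :: xs).erase m)

def build_adj (edges : List (Int × Int × Int)) : PySem.Dict Int (List (Int × Int)) :=
  edges.foldl (fun adj e =>
    let a1 := adj.insert e.1 (adj.getD e.1 [] ++ [(e.2.1, e.2.2)])
    a1.insert e.2.1 (a1.getD e.2.1 [] ++ [(e.1, e.2.2)])) PySem.Dict.empty

-- the inner `for (v, t_edge) in adj[u]` relaxation, t = t_arr
def pvRelaxA (t : Int) (st : PySem.Dict Int Int × List (Int × Int)) (vt : Int × Int) :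
    PySem.Dict Int Int × List (Int × Int) :=
  if decide (t ≤ vt.2) && (match st.1.get? vt.1 with
                           | none => true
                           | some bv => decide (vt.2 < bv)) then
    (st.1.insert vt.1 vt.2, st.2 ++ [(vt.2, vt.1)])
  else st

-- the `while queue:` loop; fuel is only a totality guard (proved sufficient below)
def pvDLoop (adj : PySem.Dict Int (List (Int × Int))) :
    Nat → PySem.Dict Int Int → List (Int × Int) → PySem.Dict Int Int
  | 0, best, _ => best
  | fuel+1, best, queue =>
    match pvPopMin queue with
    | none => best
    | some (m, rest) =>
      if (match best.get? m.2 with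
          | some b => decide (b < m.1)
          | none => false) then
        pvDLoop adj fuel best rest
      else
        let st := (adj.getD m.2 []).foldl (pvRelaxA m.1) (best, rest)
        pvDLoop adj fuel st.1 st.2

def temporal_reachable_from (source : Int) (adj : PySem.Dict Int (List (Int × Int)))
    (fuel : Nat) : PySem.Set Int :=
  PySem.Set.ofList
    (pvDLoop adj fuel ((PySem.Dict.empty : PySem.Dict Int Int).insert source 0)
      [((0 : Int), source)]).keys

-- `for s in range(n): if len(r) < n: return False` / `return True`, ported as the
-- same lazy counting loop with early exit (cnt counts the remaining sources)
def pvSrcLoopA (adj : PySem.Dict Int (List (Int × Int))) (fuel : Nat) (n : Int) :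
    Nat → Int → Bool
  | 0, _ => true
  | cnt+1, s =>
    if ((temporal_reachable_from s adj fuel).length : Int) < n then false
    else pvSrcLoopA adj fuel n cnt (s + 1)

def is_fully_reachable (k : Int) (edges : List (Int × Int × Int)) : Bool :=
  let adj := build_adj edges
  let n := 2 * k
  let fuel := (2 * edges.length + 1) * (edges.length + 1) + 1
  pvSrcLoopA adj fuel n n.toNat 0

-- ===== PORT B =====
-- one directed relaxation `if u in best and best[u] <= t and (v not in best or t < best[v])`
def pvRelaxB (st : PySem.Dict Int Int × Bool) (u v t : Int) : PySem.Dict Int Int × Bool :=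
  match st.1.get? u with
  | none => st
  | some bu =>
    if decide (bu ≤ t) && (match st.1.get? v with
                           | none => true
                           | some bv => decide (t < bv)) then
      (st.1.insert v t, true)
    else st

-- one `for a, b, t in edges:` pass
def pvPass (edges : List (Int × Int × Int)) (best : PySem.Dict Int Int) :
    PySem.Dict Int Int × Bool :=
  edges.foldl (fun st e => pvRelaxB (pvRelaxB st e.1 e.2.1 e.2.2) e.2.1 e.1 e.2.2)
    (best, false)

-- the `while changed:` loop; fuel is only a totality guard (proved sufficient below)
def pvBLoop (edges : List (Int × Int × Int)) : Nat → PySem.Dict Int Int → PySem.Dict Int Int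
  | 0, best => best
  | fuel+1, best =>
    let r := pvPass edges best
    if r.2 then pvBLoop edges fuel r.1 else best

-- the same `for s in range(n)` early-exit loop, over B's per-source fixpoint dict
def pvSrcLoopB (edges : List (Int × Int × Int)) (fuel : Nat) (n : Int) :
    Nat → Int → Bool
  | 0, _ => true
  | cnt+1, s =>
    if ((pvBLoop edges fuel ((PySem.Dict.empty : PySem.Dict Int Int).insert s 0)).size : Int) < n
      then false
    else pvSrcLoopB edges fuel n cnt (s + 1)

def is_fully_reachable_alt (k : Int) (edges : List (Int × Int × Int)) : Bool :=
  let n := 2 * k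
  let fuel := (2 * edges.length + 1) * (edges.length + 1) + 1
  pvSrcLoopB edges fuel n n.toNat 0

-- ===== PRECONDITION & SPEC =====
def Spec_is_fully_reachable (k : Int) (edges : List (Int × Int × Int)) (out : Bool) : Prop := out = is_fully_reachable_alt k edges
instance (k : Int) (edges : List (Int × Int × Int)) (out : Bool) : Decidable (Spec_is_fully_reachable k edges out) := by unfold Spec_is_fully_reachable; infer_instance

-- ===== CLAIM (what is proved, stated in full; the proofs are below) =====
def Claim_equal_is_fully_reachable : Prop := ∀ (k : Int) (edges : List (Int × Int × Int)), Dom_is_fully_reachable k edges → Spec_is_fully_reachable k edges (is_fully_reachable k edges)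

-- ===== LEMMAS AND PROOFS =====

-- temporal reachability from s: arrival-time-labelled derivations
inductive RB (edges : List (Int × Int × Int)) (s : Int) : Int → Int → Prop
  | base : RB edges s s 0
  | fwd {u a v t : Int} : RB edges s u a → (u, v, t) ∈ edges → a ≤ t → RB edges s v t
  | bwd {u a v t : Int} : RB edges s u a → (v, u, t) ∈ edges → a ≤ t → RB edges s v t

def EdgeMem (edges : List (Int × Int × Int)) (u v t : Int) : Prop :=
  (u, v, t) ∈ edges ∨ (v, u, t) ∈ edges

def pvNodes (edges : List (Int × Int × Int)) : List Int :=
  edges.map (·.1) ++ edges.map (·.2.1)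

def pvTimes (edges : List (Int × Int × Int)) : List Int := edges.map (·.2.2)

def pvPhi (edges : List (Int × Int × Int)) (b : Int) : Nat :=
  (pvTimes edges).countP (fun t => decide (t < b))

def pvSum (edges : List (Int × Int × Int)) (d : PySem.Dict Int Int) : Nat :=
  (d.items.map (fun p => pvPhi edges p.2)).sum

def pvPot (edges : List (Int × Int × Int)) (d : PySem.Dict Int Int) : Nat :=
  pvSum edges d + ((2 * edges.length + 1) - d.size) * (edges.length + 1)

def pvPotA (edges : List (Int × Int × Int)) (d : PySem.Dict Int Int)
    (q : List (Int × Int)) : Nat := q.length + pvPot edges d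

def DSound (edges : List (Int × Int × Int)) (s : Int) (d : PySem.Dict Int Int) : Prop :=
  ∀ v b, d.get? v = some b → RB edges s v b

def KIn (edges : List (Int × Int × Int)) (s : Int) (d : PySem.Dict Int Int) : Prop :=
  ∀ w ∈ d.keys, w = s ∨ w ∈ pvNodes edges

def DExt (d d' : PySem.Dict Int Int) : Prop :=
  ∀ w b, d.get? w = some b → ∃ b', d'.get? w = some b' ∧ b' ≤ b

def Expanded (edges : List (Int × Int × Int)) (d : PySem.Dict Int Int) (u bu : Int) : Prop :=
  ∀ v t, EdgeMem edges u v t → bu ≤ t → ∃ bv, d.get? v = some bv ∧ bv ≤ t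

def Closed (edges : List (Int × Int × Int)) (d : PySem.Dict Int Int) : Prop :=
  ∀ u bu, d.get? u = some bu → Expanded edges d u bu

-- ---- generic small lemmas ----

theorem pvExt_refl (d : PySem.Dict Int Int) : DExt d d := by
  intro w b h; exact ⟨b, h, le_refl b⟩

theorem pvExt_trans {d1 d2 d3 : PySem.Dict Int Int} (h1 : DExt d1 d2) (h2 : DExt d2 d3) :
    DExt d1 d3 := by
  intro w b h
  obtain ⟨b', hb', hle'⟩ := h1 w b h
  obtain ⟨b'', hb'', hle''⟩ := h2 w b' hb'
  exact ⟨b'', hb'', le_trans hle'' hle'⟩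

theorem pvExpanded_mono {edges : List (Int × Int × Int)} {d d' : PySem.Dict Int Int}
    {u bu : Int} (h : Expanded edges d u bu) (he : DExt d d') : Expanded edges d' u bu := by
  intro v t hm hle
  obtain ⟨bv, hbv, hbvle⟩ := h v t hm hle
  obtain ⟨bv', hbv', hble'⟩ := he v bv hbv
  exact ⟨bv', hbv', le_trans hble' hbvle⟩

theorem pvPhi_le (edges : List (Int × Int × Int)) (b : Int) :
    pvPhi edges b ≤ edges.length := by
  have h := List.countP_le_length (l := pvTimes edges) (p := fun t => decide (t < b))
  exact h.trans_eq (by simp [pvTimes])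

theorem countP_lt_aux (te bv : Int) (hlt : te < bv) :
    ∀ (l : List Int), te ∈ l →
      l.countP (fun t => decide (t < te)) < l.countP (fun t => decide (t < bv)) := by
  intro l hmem
  induction l with
  | nil => simp at hmem
  | cons x xs ih =>
    rcases List.mem_cons.mp hmem with h | h
    · subst h
      have hmono : xs.countP (fun t => decide (t < te)) ≤ xs.countP (fun t => decide (t < bv)) := by
        apply List.countP_mono_left
        intro a _ ha
        simp only [decide_eq_true_eq] at *
        omega
      simp only [List.countP_cons]
      simp only [decide_eq_true_eq]
      rw [if_neg (by omega), if_pos hlt]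
      omega
    · have := ih h
      simp only [List.countP_cons]
      by_cases hx : x < te
      · rw [if_pos (by simpa using hx), if_pos (by simp; omega)]; omega
      · rw [if_neg (by simpa using hx)]
        split <;> omega

theorem pvPhi_lt {edges : List (Int × Int × Int)} {te bv : Int}
    (hmem : te ∈ pvTimes edges) (hlt : te < bv) : pvPhi edges te < pvPhi edges bv :=
  countP_lt_aux te bv hlt _ hmem

theorem map_if_id (v te : Int) : ∀ (l : List (Int × Int)), (∀ q ∈ l, q.1 ≠ v) →
    l.map (fun p => if p.1 == v then (v, te) else p) = l := by
  intro l h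
  induction l with
  | nil => rfl
  | cons p l ih =>
    rw [List.map_cons, if_neg (by simpa using h p (by simp)),
      ih (fun q hq => h q (by simp [hq]))]

theorem pvSum_replace (f : Int → Nat) (v : Int) (te : Int) :
    ∀ (l : List (Int × Int)) (bv : Int), (l.map Prod.fst).Nodup → (v, bv) ∈ l →
    ((l.map (fun p => if p.1 == v then (v, te) else p)).map (fun p => f p.2)).sum + f bv
      = (l.map (fun p => f p.2)).sum + f te := by
  intro l
  induction l with
  | nil => intro bv _ h; simp at h
  | cons p l ih =>
    intro bv hnd hmem
    simp only [List.map_cons, List.nodup_cons] at hnd ⊢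
    by_cases hp : p.1 = v
    · have hpl : ∀ q ∈ l, q.1 ≠ v := by
        intro q hq hqv
        exact hnd.1 (hp ▸ hqv ▸ List.mem_map.mpr ⟨q, hq, rfl⟩)
      have hpe : p = (v, bv) := by
        rcases List.mem_cons.mp hmem with h | h
        · exact h.symm
        · exact absurd rfl (hpl _ h)
      rw [if_pos (by simp [hp])]
      rw [map_if_id v te l hpl]
      simp [hpe]
      omega
    · rw [if_neg (by simpa using hp)]
      have hmem' : (v, bv) ∈ l := by
        rcases List.mem_cons.mp hmem with h | h
        · exact absurd (by rw [← h]) hp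
        · exact h
      have := ih bv hnd.2 hmem'
      simp only [List.sum_cons]
      omega

theorem pvSize_le (edges : List (Int × Int × Int)) (s : Int) (d : PySem.Dict Int Int)
    (hn : d.keys.Nodup) (hk : KIn edges s d) : d.size ≤ 2 * edges.length + 1 := by
  have hsz : d.size = d.keys.length := by simp [PySem.Dict.size, PySem.Dict.keys]
  have h1 : d.keys.length = d.keys.toFinset.card := (List.toFinset_card_of_nodup hn).symm
  have h2 : d.keys.toFinset ⊆ (s :: pvNodes edges).toFinset := by
    intro x hx
    rw [List.mem_toFinset] at hx ⊢
    rcases hk x hx with h | h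
    · simp [h]
    · simp [h]
  have h3 := Finset.card_le_card h2
  have h4 := List.toFinset_card_le (s :: pvNodes edges)
  have h5 : (s :: pvNodes edges).length = 2 * edges.length + 1 := by
    simp [pvNodes]; omega
  omega

-- the workhorse: an improving insert strictly decreases the potential and keeps invariants
theorem pvFire_insert (edges : List (Int × Int × Int)) (s : Int) (d : PySem.Dict Int Int)
    (hn : d.keys.Nodup) (hk : KIn edges s d) (v te : Int)
    (hv : v = s ∨ v ∈ pvNodes edges) (hte : te ∈ pvTimes edges)
    (hcond : ∀ bv, d.get? v = some bv → te < bv) :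
    pvPot edges (d.insert v te) < pvPot edges d ∧ (d.insert v te).keys.Nodup ∧
      KIn edges s (d.insert v te) ∧ DExt d (d.insert v te) := by
  have hn' : (d.insert v te).keys.Nodup := PySem.Dict.nodup_keys_insert _ _ _ hn
  have hk' : KIn edges s (d.insert v te) := by
    intro w hw
    rcases (PySem.Dict.mem_keys_insert _ _ _ _).mp hw with h | h
    · subst h; exact hv
    · exact hk w h
  have hext : DExt d (d.insert v te) := by
    intro w b hb
    rw [PySem.Dict.get?_insert]
    by_cases hwv : w = v
    · subst hwv
      exact ⟨te, by simp, le_of_lt (hcond b hb)⟩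
    · exact ⟨b, by simp [hwv, hb], le_refl b⟩
  refine ⟨?_, hn', hk', hext⟩
  have hE := pvPhi_le edges te
  cases hg : d.get? v with
  | none =>
    have hit : (d.insert v te).items = d.items ++ [(v, te)] := by
      rw [PySem.Dict.items_insert_of_not_contains]
      rw [PySem.Dict.contains_eq_isSome_get?, hg]; rfl
    have hsum : pvSum edges (d.insert v te) = pvSum edges d + pvPhi edges te := by
      simp [pvSum, hit]
    have hsz : (d.insert v te).size = d.size + 1 := by
      simp [PySem.Dict.size, hit]
    have hbound := pvSize_le edges s (d.insert v te) hn' hk'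
    rw [hsz] at hbound
    unfold pvPot
    rw [hsum, hsz]
    generalize hA : (2 * edges.length + 1) - (d.size + 1) = A
    have e1 : (2 * edges.length + 1) - d.size = A + 1 := by omega
    rw [e1]
    have e2 : (A + 1) * (edges.length + 1) = A * (edges.length + 1) + (edges.length + 1) := by
      ring
    rw [e2]
    omega
  | some bv =>
    have hlt := hcond bv hg
    have hit : (d.insert v te).items = d.items.map (fun p => if p.1 == v then (v, te) else p) := by
      rw [PySem.Dict.items_insert_of_contains]
      rw [PySem.Dict.contains_eq_isSome_get?, hg]; rfl
    have hnd : (d.items.map Prod.fst).Nodup := by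
      simpa [PySem.Dict.keys] using hn
    have hmem : (v, bv) ∈ d.items := PySem.Dict.mem_items_of_get?_eq_some d hg
    have hsum := pvSum_replace (pvPhi edges) v te d.items bv hnd hmem
    have hphl := pvPhi_lt hte hlt
    have hsz : (d.insert v te).size = d.size := by
      simp [PySem.Dict.size, hit]
    unfold pvPot
    rw [hsz]
    have : pvSum edges (d.insert v te) + pvPhi edges bv = pvSum edges d + pvPhi edges te := by
      simpa [pvSum, hit] using hsum
    omega

theorem pvEdgeMem_nodes {edges : List (Int × Int × Int)} {u v t : Int}
    (h : EdgeMem edges u v t) : v ∈ pvNodes edges := by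
  rcases h with h | h
  · exact List.mem_append.mpr (Or.inr (List.mem_map.mpr ⟨(u, v, t), h, rfl⟩))
  · exact List.mem_append.mpr (Or.inl (List.mem_map.mpr ⟨(v, u, t), h, rfl⟩))

theorem pvEdgeMem_times {edges : List (Int × Int × Int)} {u v t : Int}
    (h : EdgeMem edges u v t) : t ∈ pvTimes edges := by
  rcases h with h | h
  · exact List.mem_map.mpr ⟨(u, v, t), h, rfl⟩
  · exact List.mem_map.mpr ⟨(v, u, t), h, rfl⟩

-- completeness: a sound, closed map with an entry ≤ 0 at s carries every RB arrival
theorem pvRB_complete {edges : List (Int × Int × Int)} {s : Int} {d : PySem.Dict Int Int}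
    (hC : Closed edges d) {b0 : Int} (hs : d.get? s = some b0) (hb0 : b0 ≤ 0) :
    ∀ v a, RB edges s v a → ∃ b, d.get? v = some b ∧ b ≤ a := by
  intro v a h
  induction h with
  | base => exact ⟨b0, hs, hb0⟩
  | fwd _ hm hle ih =>
    obtain ⟨b, hb, hble⟩ := ih
    exact hC _ b hb _ _ (Or.inl hm) (le_trans hble hle)
  | bwd _ hm hle ih =>
    obtain ⟨b, hb, hble⟩ := ih
    exact hC _ b hb _ _ (Or.inr hm) (le_trans hble hle)

theorem pvKeys_char {edges : List (Int × Int × Int)} {s : Int} {d : PySem.Dict Int Int}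
    (hDS : DSound edges s d) (hC : Closed edges d) {b0 : Int}
    (hs : d.get? s = some b0) (hb0 : b0 ≤ 0) :
    ∀ v, v ∈ d.keys ↔ ∃ a, RB edges s v a := by
  intro v
  constructor
  · intro hv
    cases hg : d.get? v with
    | none => exact absurd hv ((PySem.Dict.get?_eq_none_iff_not_mem_keys d v).mp hg)
    | some b => exact ⟨b, hDS v b hg⟩
  · rintro ⟨a, ha⟩
    obtain ⟨b, hb, -⟩ := pvRB_complete hC hs hb0 v a ha
    by_contra hv
    rw [(PySem.Dict.get?_eq_none_iff_not_mem_keys d v).mpr hv] at hb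
    exact absurd hb (by simp)

-- ---- adjacency of A's build_adj ----

theorem pvAdj_mem (edges : List (Int × Int × Int)) :
    ∀ u v te, (v, te) ∈ (build_adj edges).getD u [] ↔ EdgeMem edges u v te := by
  have pvAdj_aux : ∀ (l : List (Int × Int × Int)) (adj : PySem.Dict Int (List (Int × Int)))
      (u v te : Int),
      ((v, te) ∈ (l.foldl (fun adj e =>
          let a1 := adj.insert e.1 (adj.getD e.1 [] ++ [(e.2.1, e.2.2)])
          a1.insert e.2.1 (a1.getD e.2.1 [] ++ [(e.1, e.2.2)])) adj).getD u [])
        ↔ ((v, te) ∈ adj.getD u [] ∨ (u, v, te) ∈ l ∨ (v, u, te) ∈ l) := by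
    intro l
    induction l with
    | nil => intro adj u v te; simp
    | cons e l ih =>
      intro adj u v te
      rw [List.foldl_cons]
      rw [ih]
      have hstep : ((v, te) ∈ ((adj.insert e.1 (adj.getD e.1 [] ++ [(e.2.1, e.2.2)])).insert e.2.1
            (((adj.insert e.1 (adj.getD e.1 [] ++ [(e.2.1, e.2.2)]))).getD e.2.1 [] ++ [(e.1, e.2.2)])).getD u [])
          ↔ ((v, te) ∈ adj.getD u [] ∨ (u, v, te) = e ∨ (v, u, te) = e) := by
        by_cases h1 : u = e.2.1 <;> by_cases h2 : u = e.1 <;> by_cases h3 : (e.1 : Int) = e.2.1 <;>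
          simp [PySem.Dict.getD_insert, h1, h2, h3, Prod.ext_iff, eq_comm, List.mem_append]
      simp only [hstep, List.mem_cons]
      tauto
  intro u v te
  unfold build_adj EdgeMem
  rw [pvAdj_aux]
  simp [PySem.Dict.getD_empty]

-- ---- A's loop ----

theorem pvPopMin_none {q : List (Int × Int)} (h : pvPopMin q = none) : q = [] := by
  cases q with
  | nil => rfl
  | cons x xs => simp [pvPopMin] at h

theorem pvFoldMin_mem : ∀ (xs : List (Int × Int)) (x : Int × Int),
    xs.foldl (fun m y => if pvLexLt y m then y else m) x ∈ x :: xs := by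
  intro xs
  induction xs with
  | nil => intro x; simp
  | cons y ys ih =>
    intro x
    rw [List.foldl_cons]
    rcases List.mem_cons.mp (ih (if pvLexLt y x then y else x)) with h | h
    · rw [h]
      by_cases hc : pvLexLt y x <;> simp [hc]
    · simp [h]

theorem pvPopMin_some {q : List (Int × Int)} {m : Int × Int} {rest : List (Int × Int)}
    (h : pvPopMin q = some (m, rest)) :
    m ∈ q ∧ rest = q.erase m ∧ rest.length + 1 = q.length := by
  match q with
  | [] => simp [pvPopMin] at h
  | x :: xs =>
    simp only [pvPopMin, Option.some.injEq, Prod.mk.injEq] at h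
    obtain ⟨rfl, rfl⟩ := h
    have hmem := pvFoldMin_mem xs x
    refine ⟨hmem, rfl, ?_⟩
    rw [List.length_erase_of_mem hmem]
    simp

-- A-side queue invariants
def QInv (edges : List (Int × Int × Int)) (s : Int) (d : PySem.Dict Int Int)
    (q : List (Int × Int)) : Prop :=
  d.keys.Nodup ∧ DSound edges s d ∧ KIn edges s d ∧
    (∀ p ∈ q, RB edges s p.2 p.1) ∧
    (∀ p ∈ q, ∃ b, d.get? p.2 = some b ∧ b ≤ p.1)

theorem pvRelaxA_fold (edges : List (Int × Int × Int)) (s u t : Int)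
    (hRB : RB edges s u t) :
    ∀ (l : List (Int × Int)) (d : PySem.Dict Int Int) (q : List (Int × Int)),
    QInv edges s d q →
    (∀ w bw, d.get? w = some bw → w ≠ u → (bw, w) ∈ q ∨ Expanded edges d w bw) →
    d.get? u = some t →
    (∀ p : Int × Int, p ∈ l → EdgeMem edges u p.1 p.2) →
    QInv edges s (l.foldl (pvRelaxA t) (d, q)).1 (l.foldl (pvRelaxA t) (d, q)).2 ∧
    (∀ w bw, (l.foldl (pvRelaxA t) (d, q)).1.get? w = some bw → w ≠ u →
      (bw, w) ∈ (l.foldl (pvRelaxA t) (d, q)).2 ∨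
        Expanded edges (l.foldl (pvRelaxA t) (d, q)).1 w bw) ∧
    DExt d (l.foldl (pvRelaxA t) (d, q)).1 ∧
    (l.foldl (pvRelaxA t) (d, q)).1.get? u = some t ∧
    (∀ p : Int × Int, p ∈ l → t ≤ p.2 →
      ∃ bv, (l.foldl (pvRelaxA t) (d, q)).1.get? p.1 = some bv ∧ bv ≤ p.2) ∧
    pvPotA edges (l.foldl (pvRelaxA t) (d, q)).1 (l.foldl (pvRelaxA t) (d, q)).2
      ≤ pvPotA edges d q := by
  intro l
  induction l with
  | nil =>
    intro d q hI hQE hu _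
    exact ⟨hI, hQE, pvExt_refl d, hu, by simp, le_refl _⟩
  | cons p l ih =>
    intro d q hI hQE hu hl
    obtain ⟨hn, hDS, hk, hQS, hQB⟩ := hI
    have hm : EdgeMem edges u p.1 p.2 := hl p (by simp)
    simp only [List.foldl_cons]
    by_cases hc : (decide (t ≤ p.2) && (match d.get? p.1 with
                    | none => true
                    | some bv => decide (p.2 < bv))) = true
    · -- the edge improves best[p.1]: insert and push
      have hstep : pvRelaxA t (d, q) p = (d.insert p.1 p.2, q ++ [(p.2, p.1)]) := by
        simp only [pvRelaxA]
        rw [if_pos hc]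
      simp only [Bool.and_eq_true, decide_eq_true_eq] at hc
      have hts : t ≤ p.2 := hc.1
      have hcond : ∀ bv, d.get? p.1 = some bv → p.2 < bv := by
        intro bv hbv
        have h2 := hc.2
        rw [hbv] at h2
        simpa using h2
      have hup : u ≠ p.1 := by
        intro h
        rw [← h] at hcond
        exact absurd hts (by have := hcond t hu; omega)
      obtain ⟨hpot, hn', hk', hext⟩ := pvFire_insert edges s d hn hk p.1 p.2
        (Or.inr (pvEdgeMem_nodes hm)) (pvEdgeMem_times hm) hcond
      have hRBp : RB edges s p.1 p.2 := by
        rcases hm with hm | hm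
        · exact RB.fwd hRB hm hts
        · exact RB.bwd hRB hm hts
      have hDS' : DSound edges s (d.insert p.1 p.2) := by
        intro w b hb
        rw [PySem.Dict.get?_insert] at hb
        by_cases hw : w = p.1
        · rw [if_pos hw] at hb
          obtain rfl : p.2 = b := by simpa using hb
          exact hw ▸ hRBp
        · rw [if_neg hw] at hb
          exact hDS w b hb
      have hQS' : ∀ pp ∈ q ++ [(p.2, p.1)], RB edges s pp.2 pp.1 := by
        intro pp hpp
        rcases List.mem_append.mp hpp with h | h
        · exact hQS pp h
        · obtain rfl : pp = (p.2, p.1) := by simpa using h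
          exact hRBp
      have hQB' : ∀ pp ∈ q ++ [(p.2, p.1)],
          ∃ b, (d.insert p.1 p.2).get? pp.2 = some b ∧ b ≤ pp.1 := by
        intro pp hpp
        rcases List.mem_append.mp hpp with h | h
        · obtain ⟨b, hb, hle⟩ := hQB pp h
          obtain ⟨b', hb', hle'⟩ := hext pp.2 b hb
          exact ⟨b', hb', le_trans hle' hle⟩
        · obtain rfl : pp = (p.2, p.1) := by simpa using h
          exact ⟨p.2, PySem.Dict.get?_insert_self _ _ _, le_refl _⟩
      have hQE' : ∀ w bw, (d.insert p.1 p.2).get? w = some bw → w ≠ u →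
          (bw, w) ∈ q ++ [(p.2, p.1)] ∨ Expanded edges (d.insert p.1 p.2) w bw := by
        intro w bw hb hwu
        rw [PySem.Dict.get?_insert] at hb
        by_cases hw : w = p.1
        · rw [if_pos hw] at hb
          obtain rfl : p.2 = bw := by simpa using hb
          exact Or.inl (by simp [hw])
        · rw [if_neg hw] at hb
          rcases hQE w bw hb hwu with h | h
          · exact Or.inl (List.mem_append.mpr (Or.inl h))
          · exact Or.inr (pvExpanded_mono h hext)
      have hu' : (d.insert p.1 p.2).get? u = some t := by
        rw [PySem.Dict.get?_insert, if_neg hup]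
        exact hu
      obtain ⟨hI2, hQE2, hext2, hu2, hproc2, hpot2⟩ :=
        ih (d.insert p.1 p.2) (q ++ [(p.2, p.1)]) ⟨hn', hDS', hk', hQS', hQB'⟩
          hQE' hu' (fun pp hpp => hl pp (by simp [hpp]))
      rw [hstep]
      refine ⟨hI2, hQE2, pvExt_trans hext hext2, hu2, ?_, ?_⟩
      · intro pp hpp hts'
        rcases List.mem_cons.mp hpp with h | h
        · subst h
          obtain ⟨b', hb', hle'⟩ := hext2 pp.1 pp.2 (PySem.Dict.get?_insert_self _ _ _)
          exact ⟨b', hb', hle'⟩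
        · exact hproc2 pp h hts'
      · refine le_trans hpot2 ?_
        unfold pvPotA
        rw [List.length_append]
        simp only [List.length_cons, List.length_nil]
        omega
    · -- no improvement: state unchanged
      have hstep : pvRelaxA t (d, q) p = (d, q) := by
        simp only [pvRelaxA]
        rw [if_neg hc]
      obtain ⟨hI2, hQE2, hext2, hu2, hproc2, hpot2⟩ :=
        ih d q ⟨hn, hDS, hk, hQS, hQB⟩ hQE hu (fun pp hpp => hl pp (by simp [hpp]))
      rw [hstep]
      refine ⟨hI2, hQE2, hext2, hu2, ?_, hpot2⟩
      intro pp hpp hts'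
      rcases List.mem_cons.mp hpp with h | h
      · subst h
        -- the guard failed though t ≤ pp.2: best[pp.1] must already be ≤ pp.2
        rw [Bool.and_eq_true] at hc
        cases hg : d.get? pp.1 with
        | none =>
          exfalso
          apply hc
          refine ⟨by simpa using hts', ?_⟩
          rw [hg]
        | some bv =>
          have hbv : bv ≤ pp.2 := by
            by_contra hgt
            apply hc
            refine ⟨by simpa using hts', ?_⟩
            rw [hg]
            simpa using by omega
          obtain ⟨b', hb', hle'⟩ := hext2 pp.1 bv hg
          exact ⟨b', hb', le_trans hle' hbv⟩
      · exact hproc2 pp h hts'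

theorem pvDLoop_spec (edges : List (Int × Int × Int)) (s : Int)
    (adj : PySem.Dict Int (List (Int × Int)))
    (hadj : ∀ u v te, (v, te) ∈ adj.getD u [] ↔ EdgeMem edges u v te) :
    ∀ (fuel : Nat) (d : PySem.Dict Int Int) (q : List (Int × Int)),
    QInv edges s d q →
    (∀ w bw, d.get? w = some bw → (bw, w) ∈ q ∨ Expanded edges d w bw) →
    pvPotA edges d q < fuel →
    DSound edges s (pvDLoop adj fuel d q) ∧ Closed edges (pvDLoop adj fuel d q) ∧
      (pvDLoop adj fuel d q).keys.Nodup ∧ DExt d (pvDLoop adj fuel d q) := by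
  intro fuel
  induction fuel with
  | zero => intro d q _ _ hpot; omega
  | succ fuel ih =>
    intro d q hI hQE hpot
    obtain ⟨hn, hDS, hk, hQS, hQB⟩ := hI
    simp only [pvDLoop]
    cases hpop : pvPopMin q with
    | none =>
      have hq : q = [] := pvPopMin_none hpop
      subst hq
      refine ⟨hDS, ?_, hn, pvExt_refl d⟩
      intro w bw hb
      rcases hQE w bw hb with h | h
      · exact absurd h (by simp)
      · exact h
    | some x =>
      obtain ⟨m, rest⟩ := x
      obtain ⟨hmem, hrest, hlen⟩ := pvPopMin_some hpop
      have hsub : ∀ p ∈ rest, p ∈ q := by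
        intro p hp
        rw [hrest] at hp
        exact List.erase_subset hp
      have hQSr : ∀ p ∈ rest, RB edges s p.2 p.1 := fun p hp => hQS p (hsub p hp)
      have hQBr : ∀ p ∈ rest, ∃ b, d.get? p.2 = some b ∧ b ≤ p.1 :=
        fun p hp => hQB p (hsub p hp)
      have hpotr : pvPotA edges d rest + 1 = pvPotA edges d q := by
        unfold pvPotA
        omega
      dsimp only
      by_cases hskip : (match d.get? m.2 with
                        | some b => decide (b < m.1)
                        | none => false) = true
      · rw [if_pos hskip]
        obtain ⟨b, hbm, hblt⟩ : ∃ b, d.get? m.2 = some b ∧ b < m.1 := by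
          cases hg : d.get? m.2 with
          | none => rw [hg] at hskip; simp at hskip
          | some b => rw [hg] at hskip; exact ⟨b, rfl, by simpa using hskip⟩
        have hQEr : ∀ w bw, d.get? w = some bw → (bw, w) ∈ rest ∨ Expanded edges d w bw := by
          intro w bw hb
          rcases hQE w bw hb with h | h
          · left
            have hne : (bw, w) ≠ m := by
              intro he
              have hw : w = m.2 := by rw [← he]
              have hbw : bw = m.1 := by rw [← he]
              rw [hw, hbm] at hb
              obtain rfl : b = bw := by simpa using hb
              omega
            rw [hrest]
            exact (List.mem_erase_of_ne hne).mpr h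
          · right; exact h
        exact ih d rest ⟨hn, hDS, hk, hQSr, hQBr⟩ hQEr (by omega)
      · rw [if_neg hskip]
        obtain ⟨b, hbm, hble⟩ := hQB m hmem
        have hu : d.get? m.2 = some m.1 := by
          rw [hbm] at hskip ⊢
          have : ¬ (b < m.1) := by simpa using hskip
          have : b = m.1 := by omega
          rw [this]
        have hRBu : RB edges s m.2 m.1 := hQS m hmem
        have hQEr : ∀ w bw, d.get? w = some bw → w ≠ m.2 →
            (bw, w) ∈ rest ∨ Expanded edges d w bw := by
          intro w bw hb hwne
          rcases hQE w bw hb with h | h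
          · left
            rw [hrest]
            exact (List.mem_erase_of_ne (by intro he; exact hwne (by rw [← he]))).mpr h
          · right; exact h
        obtain ⟨hI2, hQE2, hext2, hu2, hproc2, hpot2⟩ :=
          pvRelaxA_fold edges s m.2 m.1 hRBu (adj.getD m.2 []) d rest
            ⟨hn, hDS, hk, hQSr, hQBr⟩ hQEr hu
            (fun p hp => (hadj m.2 p.1 p.2).mp hp)
        have hQE_full : ∀ w bw,
            ((adj.getD m.2 []).foldl (pvRelaxA m.1) (d, rest)).1.get? w = some bw →
            (bw, w) ∈ ((adj.getD m.2 []).foldl (pvRelaxA m.1) (d, rest)).2 ∨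
              Expanded edges ((adj.getD m.2 []).foldl (pvRelaxA m.1) (d, rest)).1 w bw := by
          intro w bw hb
          by_cases hw : w = m.2
          · subst hw
            rw [hu2] at hb
            obtain rfl : m.1 = bw := by simpa using hb
            right
            intro v te hmm hle
            exact hproc2 (v, te) ((hadj m.2 v te).mpr hmm) hle
          · exact hQE2 w bw hb hw
        obtain ⟨hA, hB, hC, hD⟩ :=
          ih ((adj.getD m.2 []).foldl (pvRelaxA m.1) (d, rest)).1
            ((adj.getD m.2 []).foldl (pvRelaxA m.1) (d, rest)).2
            hI2 hQE_full (by unfold pvPotA at hpot hpot2 hpotr ⊢; omega)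
        exact ⟨hA, hB, hC, pvExt_trans hext2 hD⟩

-- ---- B's loop ----

def Fire (d : PySem.Dict Int Int) (u v t : Int) : Prop :=
  ∃ bu, d.get? u = some bu ∧ bu ≤ t ∧ (∀ bv, d.get? v = some bv → t < bv)

theorem pvRelaxB_step (edges : List (Int × Int × Int)) (s : Int)
    (st : PySem.Dict Int Int × Bool) (u v t : Int) (hm : EdgeMem edges u v t)
    (hn : st.1.keys.Nodup) (hDS : DSound edges s st.1) (hk : KIn edges s st.1) :
    (pvRelaxB st u v t).1.keys.Nodup ∧ DSound edges s (pvRelaxB st u v t).1 ∧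
    KIn edges s (pvRelaxB st u v t).1 ∧ DExt st.1 (pvRelaxB st u v t).1 ∧
    pvPot edges (pvRelaxB st u v t).1 + (pvRelaxB st u v t).2.toNat
      ≤ pvPot edges st.1 + st.2.toNat ∧
    ((pvRelaxB st u v t).2 = false →
      (pvRelaxB st u v t).1 = st.1 ∧ st.2 = false ∧ ¬ Fire st.1 u v t) := by
  obtain ⟨d, c⟩ := st
  simp only at hn hDS hk
  unfold pvRelaxB
  simp only
  cases hg : d.get? u with
  | none =>
    refine ⟨hn, hDS, hk, pvExt_refl d, by simp, ?_⟩
    intro hc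
    refine ⟨rfl, by simpa using hc, ?_⟩
    rintro ⟨bu, hbu, -, -⟩
    rw [hg] at hbu
    exact absurd hbu (by simp)
  | some bu =>
    dsimp only
    by_cases hcond : (decide (bu ≤ t) && (match d.get? v with
                      | none => true
                      | some bv => decide (t < bv))) = true
    · rw [if_pos hcond]
      simp only [Bool.and_eq_true, decide_eq_true_eq] at hcond
      have hbt : bu ≤ t := hcond.1
      have hall : ∀ bv, d.get? v = some bv → t < bv := by
        intro bv hbv
        have := hcond.2
        rw [hbv] at this
        simpa using this
      obtain ⟨hpot, hn', hk', hext⟩ := pvFire_insert edges s d hn hk v t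
        (Or.inr (pvEdgeMem_nodes hm)) (pvEdgeMem_times hm) hall
      refine ⟨hn', ?_, hk', hext, ?_, by simp⟩
      · intro w b hb
        rw [PySem.Dict.get?_insert] at hb
        by_cases hwv : w = v
        · rw [if_pos hwv] at hb
          obtain rfl : t = b := by simpa using hb
          subst hwv
          rcases hm with hm | hm
          · exact RB.fwd (hDS u bu hg) hm hbt
          · exact RB.bwd (hDS u bu hg) hm hbt
        · rw [if_neg hwv] at hb
          exact hDS w b hb
      · simp only [Bool.toNat_true]
        omega
    · rw [if_neg hcond]
      refine ⟨hn, hDS, hk, pvExt_refl d, by simp, ?_⟩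
      intro hc
      refine ⟨rfl, by simpa using hc, ?_⟩
      rintro ⟨bu', hbu', hle', hall'⟩
      rw [hg] at hbu'
      obtain rfl : bu = bu' := by simpa using hbu'
      apply hcond
      simp only [Bool.and_eq_true, decide_eq_true_eq]
      refine ⟨hle', ?_⟩
      cases hgv : d.get? v with
      | none => rfl
      | some bv => simpa using hall' bv hgv

theorem pvPass_fold (edges : List (Int × Int × Int)) (s : Int) :
    ∀ (l : List (Int × Int × Int)) (d : PySem.Dict Int Int) (c : Bool),
    (∀ e ∈ l, e ∈ edges) → d.keys.Nodup → DSound edges s d → KIn edges s d →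
    (l.foldl (fun st e => pvRelaxB (pvRelaxB st e.1 e.2.1 e.2.2) e.2.1 e.1 e.2.2) (d, c)).1.keys.Nodup ∧
    DSound edges s (l.foldl (fun st e => pvRelaxB (pvRelaxB st e.1 e.2.1 e.2.2) e.2.1 e.1 e.2.2) (d, c)).1 ∧
    KIn edges s (l.foldl (fun st e => pvRelaxB (pvRelaxB st e.1 e.2.1 e.2.2) e.2.1 e.1 e.2.2) (d, c)).1 ∧
    DExt d (l.foldl (fun st e => pvRelaxB (pvRelaxB st e.1 e.2.1 e.2.2) e.2.1 e.1 e.2.2) (d, c)).1 ∧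
    pvPot edges (l.foldl (fun st e => pvRelaxB (pvRelaxB st e.1 e.2.1 e.2.2) e.2.1 e.1 e.2.2) (d, c)).1
        + (l.foldl (fun st e => pvRelaxB (pvRelaxB st e.1 e.2.1 e.2.2) e.2.1 e.1 e.2.2) (d, c)).2.toNat
      ≤ pvPot edges d + c.toNat ∧
    ((l.foldl (fun st e => pvRelaxB (pvRelaxB st e.1 e.2.1 e.2.2) e.2.1 e.1 e.2.2) (d, c)).2 = false →
      (l.foldl (fun st e => pvRelaxB (pvRelaxB st e.1 e.2.1 e.2.2) e.2.1 e.1 e.2.2) (d, c)).1 = d ∧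
      c = false ∧ ∀ e ∈ l, ¬ Fire d e.1 e.2.1 e.2.2 ∧ ¬ Fire d e.2.1 e.1 e.2.2) := by
  intro l
  induction l with
  | nil =>
    intro d c hl hn hDS hk
    refine ⟨hn, hDS, hk, pvExt_refl d, by simp, ?_⟩
    intro hc
    exact ⟨rfl, by simpa using hc, by simp⟩
  | cons e l ih =>
    intro d c hl hn hDS hk
    simp only [List.foldl_cons]
    have he : e ∈ edges := hl e (by simp)
    have hm1 : EdgeMem edges e.1 e.2.1 e.2.2 := Or.inl (by simpa using he)
    have hm2 : EdgeMem edges e.2.1 e.1 e.2.2 := Or.inr (by simpa using he)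
    obtain ⟨hn1, hDS1, hk1, hext1, hpot1, hlast1⟩ :=
      pvRelaxB_step edges s (d, c) e.1 e.2.1 e.2.2 hm1 hn hDS hk
    dsimp only at hext1 hpot1 hlast1
    obtain ⟨hn2, hDS2, hk2, hext2, hpot2, hlast2⟩ :=
      pvRelaxB_step edges s (pvRelaxB (d, c) e.1 e.2.1 e.2.2) e.2.1 e.1 e.2.2 hm2 hn1 hDS1 hk1
    obtain ⟨hnF, hDSF, hkF, hextF, hpotF, hlastF⟩ :=
      ih (pvRelaxB (pvRelaxB (d, c) e.1 e.2.1 e.2.2) e.2.1 e.1 e.2.2).1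
        (pvRelaxB (pvRelaxB (d, c) e.1 e.2.1 e.2.2) e.2.1 e.1 e.2.2).2
        (fun e' he' => hl e' (by simp [he'])) hn2 hDS2 hk2
    simp only [Prod.mk.eta] at hnF hDSF hkF hextF hpotF hlastF
    refine ⟨hnF, hDSF, hkF, pvExt_trans hext1 (pvExt_trans hext2 hextF), by omega, ?_⟩
    intro hfin
    obtain ⟨hq1, hq2, hq3⟩ := hlastF hfin
    obtain ⟨hr1, hr2, hr3⟩ := hlast2 hq2
    obtain ⟨hs1, hs2, hs3⟩ := hlast1 hr2
    rw [hr1, hs1] at hq1 hq3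
    rw [hs1] at hr3
    refine ⟨hq1, hs2, ?_⟩
    intro e' he'
    rcases List.mem_cons.mp he' with h | h
    · subst h
      exact ⟨hs3, hr3⟩
    · exact hq3 e' h

theorem pvBLoop_spec (edges : List (Int × Int × Int)) (s : Int) :
    ∀ (fuel : Nat) (d : PySem.Dict Int Int),
    d.keys.Nodup → DSound edges s d → KIn edges s d →
    pvPot edges d < fuel →
    DSound edges s (pvBLoop edges fuel d) ∧ Closed edges (pvBLoop edges fuel d) ∧
      (pvBLoop edges fuel d).keys.Nodup ∧ DExt d (pvBLoop edges fuel d) := by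
  intro fuel
  induction fuel with
  | zero => intro d _ _ _ hpot; omega
  | succ fuel ih =>
    intro d hn hDS hk hpot
    obtain ⟨hn1, hDS1, hk1, hext1, hpot1, hlast1⟩ :=
      pvPass_fold edges s edges d false (fun e he => he) hn hDS hk
    rw [show List.foldl (fun st e => pvRelaxB (pvRelaxB st e.1 e.2.1 e.2.2) e.2.1 e.1 e.2.2)
        (d, false) edges = pvPass edges d from rfl] at hn1 hDS1 hk1 hext1 hpot1 hlast1
    simp only [pvBLoop]
    by_cases hr : (pvPass edges d).2 = true
    · rw [if_pos hr]
      have hpot' : pvPot edges (pvPass edges d).1 < fuel := by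
        rw [hr] at hpot1
        simp at hpot1
        omega
      obtain ⟨hA, hB, hC, hD⟩ := ih (pvPass edges d).1 hn1 hDS1 hk1 hpot'
      exact ⟨hA, hB, hC, pvExt_trans hext1 hD⟩
    · rw [if_neg hr]
      have hfalse : (pvPass edges d).2 = false := by simpa using hr
      obtain ⟨heq, -, hnofire⟩ := hlast1 hfalse
      refine ⟨hDS, ?_, hn, pvExt_refl d⟩
      intro u bu hu v t hm hle
      rcases hm with hm | hm
      · have hnf := (hnofire (u, v, t) hm).1
        cases hgv : d.get? v with
        | none =>
          exact absurd ⟨bu, hu, hle, fun bv hbv => by rw [hgv] at hbv; exact absurd hbv (by simp)⟩ hnf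
        | some bv =>
          by_cases hlt : t < bv
          · exact absurd ⟨bu, hu, hle, fun bv' hbv' => by
              rw [hgv] at hbv'
              obtain rfl : bv = bv' := by simpa using hbv'
              exact hlt⟩ hnf
          · exact ⟨bv, rfl, by omega⟩
      · have hnf := (hnofire (v, u, t) hm).2
        cases hgv : d.get? v with
        | none =>
          exact absurd ⟨bu, hu, hle, fun bv hbv => by rw [hgv] at hbv; exact absurd hbv (by simp)⟩ hnf
        | some bv =>
          by_cases hlt : t < bv
          · exact absurd ⟨bu, hu, hle, fun bv' hbv' => by
              rw [hgv] at hbv'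
              obtain rfl : bv = bv' := by simpa using hbv'
              exact hlt⟩ hnf
          · exact ⟨bv, rfl, by omega⟩

-- ---- initial state and assembly ----

theorem pvInit_get? (s w : Int) :
    ((PySem.Dict.empty : PySem.Dict Int Int).insert s 0).get? w
      = if w = s then some 0 else none := by
  rw [PySem.Dict.get?_insert]
  simp [PySem.Dict.get?_empty]

theorem pvInit_keys (s : Int) :
    ((PySem.Dict.empty : PySem.Dict Int Int).insert s 0).keys = [s] := by
  rw [PySem.Dict.keys_insert_of_not_contains] <;>
    simp [PySem.Dict.keys_empty, PySem.Dict.contains_empty]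

theorem pvInit_items (s : Int) :
    ((PySem.Dict.empty : PySem.Dict Int Int).insert s 0).items = [(s, 0)] := by
  rw [PySem.Dict.items_insert_of_not_contains]
  · simp [PySem.Dict.empty]
  · simp [PySem.Dict.contains_empty]

theorem pvInit_pot (edges : List (Int × Int × Int)) (s : Int) :
    pvPotA edges ((PySem.Dict.empty : PySem.Dict Int Int).insert s 0) [((0 : Int), s)]
      < (2 * edges.length + 1) * (edges.length + 1) + 1 := by
  have hphi := pvPhi_le edges 0
  have hsum : pvSum edges ((PySem.Dict.empty : PySem.Dict Int Int).insert s 0)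
      = pvPhi edges 0 := by
    simp [pvSum, pvInit_items]
  have hsz : ((PySem.Dict.empty : PySem.Dict Int Int).insert s 0).size = 1 := by
    simp [PySem.Dict.size, pvInit_items]
  unfold pvPotA pvPot
  rw [hsum, hsz]
  generalize hE : edges.length = E
  have e1 : (2 * E + 1) - 1 = 2 * E := by omega
  rw [e1]
  have e2 : (2 * E + 1) * (E + 1) = 2 * E * (E + 1) + (E + 1) := by ring
  rw [e2]
  simp
  omega

theorem pvPer_source (edges : List (Int × Int × Int)) (s : Int) :
    ((temporal_reachable_from s (build_adj edges)
        ((2 * edges.length + 1) * (edges.length + 1) + 1)).length : Int)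
      = ((pvBLoop edges ((2 * edges.length + 1) * (edges.length + 1) + 1)
          ((PySem.Dict.empty : PySem.Dict Int Int).insert s 0)).size : Int) := by
  have hg0 : ∀ w : Int, ((PySem.Dict.empty : PySem.Dict Int Int).insert s 0).get? w
      = if w = s then some 0 else none := pvInit_get? s
  have hn0 : ((PySem.Dict.empty : PySem.Dict Int Int).insert s 0).keys.Nodup := by
    rw [pvInit_keys]; simp
  have hDS0 : DSound edges s ((PySem.Dict.empty : PySem.Dict Int Int).insert s 0) := by
    intro v b hb
    rw [hg0 v] at hb
    by_cases hv : v = s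
    · rw [if_pos hv] at hb
      obtain rfl : (0 : Int) = b := by simpa using hb
      exact hv ▸ RB.base
    · rw [if_neg hv] at hb
      exact absurd hb (by simp)
  have hk0 : KIn edges s ((PySem.Dict.empty : PySem.Dict Int Int).insert s 0) := by
    intro w hw
    rw [pvInit_keys] at hw
    left
    simpa using hw
  have hgs : ((PySem.Dict.empty : PySem.Dict Int Int).insert s 0).get? s = some 0 := by
    rw [hg0 s, if_pos rfl]
  -- A side
  have hQS0 : ∀ p ∈ [((0 : Int), s)], RB edges s p.2 p.1 := by
    intro p hp
    obtain rfl : p = ((0 : Int), s) := by simpa using hp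
    exact RB.base
  have hQB0 : ∀ p ∈ [((0 : Int), s)],
      ∃ b, ((PySem.Dict.empty : PySem.Dict Int Int).insert s 0).get? p.2 = some b ∧ b ≤ p.1 := by
    intro p hp
    obtain rfl : p = ((0 : Int), s) := by simpa using hp
    exact ⟨0, hgs, le_refl 0⟩
  have hQE0 : ∀ w bw, ((PySem.Dict.empty : PySem.Dict Int Int).insert s 0).get? w = some bw →
      (bw, w) ∈ [((0 : Int), s)] ∨
        Expanded edges ((PySem.Dict.empty : PySem.Dict Int Int).insert s 0) w bw := by
    intro w bw hb
    rw [hg0 w] at hb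
    by_cases hv : w = s
    · rw [if_pos hv] at hb
      obtain rfl : (0 : Int) = bw := by simpa using hb
      subst hv
      exact Or.inl (by simp)
    · rw [if_neg hv] at hb
      exact absurd hb (by simp)
  obtain ⟨hDSA, hCA, hnA, hextA⟩ :=
    pvDLoop_spec edges s (build_adj edges) (pvAdj_mem edges)
      ((2 * edges.length + 1) * (edges.length + 1) + 1)
      ((PySem.Dict.empty : PySem.Dict Int Int).insert s 0) [((0 : Int), s)]
      ⟨hn0, hDS0, hk0, hQS0, hQB0⟩ hQE0 (pvInit_pot edges s)
  -- B side
  obtain ⟨hDSB, hCB, hnB, hextB⟩ :=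
    pvBLoop_spec edges s ((2 * edges.length + 1) * (edges.length + 1) + 1)
      ((PySem.Dict.empty : PySem.Dict Int Int).insert s 0) hn0 hDS0 hk0
      (by have := pvInit_pot edges s; unfold pvPotA at this; omega)
  obtain ⟨a0, ha0, ha0le⟩ := hextA s 0 hgs
  obtain ⟨b0, hb0, hb0le⟩ := hextB s 0 hgs
  have hcharA := pvKeys_char hDSA hCA ha0 ha0le
  have hcharB := pvKeys_char hDSB hCB hb0 hb0le
  have hmm : ∀ v, v ∈ (pvDLoop (build_adj edges)
      ((2 * edges.length + 1) * (edges.length + 1) + 1)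
      ((PySem.Dict.empty : PySem.Dict Int Int).insert s 0) [((0 : Int), s)]).keys
      ↔ v ∈ (pvBLoop edges ((2 * edges.length + 1) * (edges.length + 1) + 1)
      ((PySem.Dict.empty : PySem.Dict Int Int).insert s 0)).keys := by
    intro v
    rw [hcharA v, hcharB v]
  have hfin : (pvDLoop (build_adj edges)
      ((2 * edges.length + 1) * (edges.length + 1) + 1)
      ((PySem.Dict.empty : PySem.Dict Int Int).insert s 0) [((0 : Int), s)]).keys.toFinset
      = (pvBLoop edges ((2 * edges.length + 1) * (edges.length + 1) + 1)
      ((PySem.Dict.empty : PySem.Dict Int Int).insert s 0)).keys.toFinset := by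
    apply Finset.ext
    intro v
    simpa [List.mem_toFinset] using hmm v
  have hlenA := List.toFinset_card_of_nodup hnA
  have hlenB := List.toFinset_card_of_nodup hnB
  have hsize : (pvBLoop edges ((2 * edges.length + 1) * (edges.length + 1) + 1)
      ((PySem.Dict.empty : PySem.Dict Int Int).insert s 0)).size
      = (pvBLoop edges ((2 * edges.length + 1) * (edges.length + 1) + 1)
      ((PySem.Dict.empty : PySem.Dict Int Int).insert s 0)).keys.length := by
    simp [PySem.Dict.size, PySem.Dict.keys]
  unfold temporal_reachable_from
  rw [PySem.Set.ofList_eq_self_of_nodup _ hnA, hsize]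
  congr 1
  rw [← hlenA, ← hlenB, hfin]

theorem pvLoops_eq (edges : List (Int × Int × Int)) (n : Int) :
    ∀ (cnt : Nat) (s : Int),
    pvSrcLoopA (build_adj edges) ((2 * edges.length + 1) * (edges.length + 1) + 1) n cnt s
      = pvSrcLoopB edges ((2 * edges.length + 1) * (edges.length + 1) + 1) n cnt s := by
  intro cnt
  induction cnt with
  | zero => intro s; rfl
  | succ cnt ih =>
    intro s
    simp only [pvSrcLoopA, pvSrcLoopB]
    rw [pvPer_source edges s]
    split
    · rfl
    · exact ih (s + 1)

-- ===== VERDICT (by name: the statement is the Claim_ definition above) =====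
theorem is_fully_reachable_spec : Claim_equal_is_fully_reachable := by
  intro k edges _
  unfold Spec_is_fully_reachable is_fully_reachable is_fully_reachable_alt
  exact pvLoops_eq edges (2 * k) (2 * k).toNat 0
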